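-- pv_equiv track=rewrite | github.com/DefenderOfBasic/luigi-mangione-storyline | src/reddit/combine_all.py | add_line_spaces_until_content
-- ===== SOURCE A (Python) =====
-- def add_line_spaces_until_content(text):
--     lines = text.split('\n')
--     modified_lines = []
--
--     for line in lines:
--         if line.strip() == '## Content':
--             modified_lines.append(line)
--             # Stop adding spaces after this point
--             modified_lines.extend(lines[len(modified_lines):])
--             break
--         else:
--             # Add two spaces to the end of non-empty lines
--             if line.strip():
--                 modified_lines.append(line + '  ')
--             else:
--                 modified_lines.append(line)
--
--     return '\n'.join(modified_lines)
-- ===== SOURCE B (Python) =====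
-- def add_line_spaces_until_content(text):
--     # Scan the raw string with find('\n') instead of splitting it all into lines:
--     # once the '## Content' line is reached, the remaining raw text (marker line
--     # included) is kept as one verbatim chunk.
--     pieces = []
--     rem = text
--     while True:
--         nl = rem.find('\n')
--         line = rem if nl == -1 else rem[:nl]
--         if line.strip() == '## Content':
--             pieces.append(rem)
--             break
--         pieces.append(line + '  ' if line.strip() else line)
--         if nl == -1:
--             break
--         rem = rem[nl + 1:]
--     return '\n'.join(pieces)
-- ===== Notes on version B (the rewrite author's own statement) =====
-- stated objective: alternative
-- what changed: B never splits the text into a list of lines: it scans the raw string with find('\n'), padding one line at a time, and once the '## Content' line is reached it appends the whole remaining raw text (marker line included) as a single verbatim chunk, instead of A's split-into-lines loop with the extend-the-remainder-and-break trick.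
import Mathlib
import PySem

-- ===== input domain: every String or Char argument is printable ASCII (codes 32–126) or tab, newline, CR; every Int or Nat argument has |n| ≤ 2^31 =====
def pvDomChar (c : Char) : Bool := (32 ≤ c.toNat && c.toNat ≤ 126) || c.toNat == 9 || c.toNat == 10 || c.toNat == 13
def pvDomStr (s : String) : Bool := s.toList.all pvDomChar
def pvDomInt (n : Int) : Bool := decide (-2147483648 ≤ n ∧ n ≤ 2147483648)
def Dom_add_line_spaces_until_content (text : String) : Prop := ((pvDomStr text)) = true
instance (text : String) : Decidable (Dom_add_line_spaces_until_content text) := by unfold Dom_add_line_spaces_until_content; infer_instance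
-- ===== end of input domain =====

-- B scans the raw string with find('\n') and keeps everything from the marker line on as one
-- verbatim chunk, instead of A's split-into-lines loop; return values proved equal (objective: alternative).

-- ===== PORT A =====
-- A's loop over lines: append lines one by one; on the first stripped-'## Content' line append it,
-- extend with lines[len(modified_lines):], break.
def aLoop (lines : List (List Char)) (rest : List (List Char)) (acc : List (List Char)) :
    List (List Char) :=
  match rest with
  | [] => acc
  | line :: rs =>
    if PySem.Chars.strip line == "## Content".toList then
      let acc2 := acc ++ [line]
      acc2 ++ PySem.List.slice lines (some (acc2.length : Int)) none
    else
      if PySem.Chars.strip line ≠ [] then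
        aLoop lines rs (acc ++ [line ++ "  ".toList])
      else
        aLoop lines rs (acc ++ [line])

def add_line_spaces_until_content (text : String) : String :=
  let lines := PySem.Chars.splitOn text.toList "\n".toList
  String.ofList (PySem.Chars.join "\n".toList (aLoop lines lines []))

-- ===== PORT B =====
-- termination fact for B's scan: dropping past the found '\n' strictly shrinks the remainder
lemma pvFindNlLt (rem : List Char) (h : ¬ PySem.Chars.find rem "\n".toList = -1) :
    (PySem.List.slice rem (some (PySem.Chars.find rem "\n".toList + 1)) none).length < rem.length := by
  have h0 : 0 ≤ PySem.Chars.find rem "\n".toList := by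
    have := PySem.Chars.neg_one_le_find rem "\n".toList; omega
  have hspec := (PySem.Chars.find_spec (s := rem) (sub := "\n".toList) h0).1
  have hne : rem.drop (PySem.Chars.find rem "\n".toList).toNat ≠ [] := by
    intro hc
    rw [hc] at hspec
    have : "\n".toList = [] := List.prefix_nil.mp hspec
    simp at this
  have hlt : (PySem.Chars.find rem "\n".toList).toNat < rem.length := by
    by_contra hge
    exact hne (List.drop_eq_nil_of_le (by omega))
  rw [PySem.List.slice_from rem (by omega)]
  simp only [List.length_drop]
  omega

-- B's loop: repeatedly find the next '\n' in the raw remainder; emit padded lines until the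
-- marker line, then emit the whole remainder verbatim and stop.
def bLoop (rem : List Char) (acc : List (List Char)) : List (List Char) :=
  let nl := PySem.Chars.find rem "\n".toList
  let line := if nl = -1 then rem else PySem.List.slice rem none (some nl)
  if PySem.Chars.strip line == "## Content".toList then
    acc ++ [rem]
  else
    let acc2 := acc ++ [if PySem.Chars.strip line ≠ [] then line ++ "  ".toList else line]
    if h : nl = -1 then acc2
    else bLoop (PySem.List.slice rem (some (nl + 1)) none) acc2
termination_by rem.length
decreasing_by exact pvFindNlLt rem h

def add_line_spaces_until_content_alt (text : String) : String :=
  String.ofList (PySem.Chars.join "\n".toList (bLoop text.toList []))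

-- ===== PRECONDITION & SPEC =====
def Spec_add_line_spaces_until_content (text : String) (out : String) : Prop := out = add_line_spaces_until_content_alt text
instance (text : String) (out : String) : Decidable (Spec_add_line_spaces_until_content text out) := by unfold Spec_add_line_spaces_until_content; infer_instance

-- ===== CLAIM (what is proved, stated in full; the proofs are below) =====
def Claim_equal_add_line_spaces_until_content : Prop := ∀ (text : String), Dom_add_line_spaces_until_content text → Spec_add_line_spaces_until_content text (add_line_spaces_until_content text)

-- ===== LEMMAS AND PROOFS =====

def padLine (l : List Char) : List Char :=
  if PySem.Chars.strip l ≠ [] then l ++ "  ".toList else l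

-- the common recursive description of the transformation, on the list of lines
def refTransform : List (List Char) → List (List Char)
  | [] => []
  | l :: ls =>
    if PySem.Chars.strip l == "## Content".toList then l :: ls
    else padLine l :: refTransform ls

lemma aLoop_eq (lines : List (List Char)) :
    ∀ (rest acc : List (List Char)), rest = lines.drop acc.length →
      aLoop lines rest acc = acc ++ refTransform rest := by
  intro rest
  induction rest with
  | nil => intro acc _; simp [aLoop, refTransform]
  | cons line rs ih =>
    intro acc h
    have hrs : rs = lines.drop (acc.length + 1) := by
      have htail := congrArg List.tail h
      simpa [List.tail_drop] using htail
    simp only [aLoop]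
    cases hb : (PySem.Chars.strip line == "## Content".toList) with
    | true =>
      simp only [refTransform, hb, if_true]
      have hlen : (acc ++ [line]).length = acc.length + 1 := by simp
      rw [hlen, PySem.List.slice_from_natCast, ← hrs]
      simp
    | false =>
      simp only [refTransform, hb, Bool.false_eq_true, if_false]
      by_cases hne : PySem.Chars.strip line ≠ []
      · rw [if_pos hne, ih _ (by simpa using hrs)]
        simp [padLine, hne]
      · rw [if_neg hne, ih _ (by simpa using hrs)]
        simp [padLine, hne]

-- PySem.Chars.splitOn on a one-character separator is List.splitOnP
lemma splitOn_go_eq (c : Char) :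
    ∀ (fuel : Nat) (l cur : List Char) (acc : List (List Char)), l.length < fuel →
      PySem.Chars.splitOn.go [c] fuel l cur acc
        = acc.reverse ++ (List.splitOnP (· == c) l).modifyHead (fun t => cur.reverse ++ t) := by
  intro fuel
  induction fuel with
  | zero => intro l cur acc h; omega
  | succ n ih =>
    intro l cur acc h
    cases l with
    | nil => simp [PySem.Chars.splitOn.go, List.splitOnP_nil]
    | cons x rest =>
      simp only [PySem.Chars.splitOn.go]
      by_cases hx : x = c
      · subst hx
        have hpre : [x].isPrefixOf (x :: rest) = true := by simp [List.isPrefixOf]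
        rw [if_pos hpre]
        rw [ih _ _ _ (by simp at h ⊢; omega)]
        have hsp : List.splitOnP (· == x) (x :: rest) = [] :: List.splitOnP (· == x) rest := by
          simp [List.splitOnP_cons]
        rw [hsp]
        cases hs : List.splitOnP (· == x) rest with
        | nil => exact absurd hs (List.splitOnP_ne_nil _ _)
        | cons q qs => simp [hs]
      · have hpre : [c].isPrefixOf (x :: rest) = false := by
          simp [List.isPrefixOf]; exact fun hc => absurd hc.symm hx
        rw [if_neg (by simp [hpre])]
        rw [ih _ _ _ (by simp at h ⊢; omega)]
        have hsp : List.splitOnP (· == c) (x :: rest)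
            = (List.splitOnP (· == c) rest).modifyHead (List.cons x) := by
          simp [List.splitOnP_cons, hx]
        rw [hsp, List.modifyHead_modifyHead]
        cases hs : List.splitOnP (· == c) rest with
        | nil => exact absurd hs (List.splitOnP_ne_nil _ _)
        | cons q qs => simp

lemma toList_newline : "\n".toList = ['\n'] := by decide

lemma splitOn_eq_splitOnP (s : List Char) :
    PySem.Chars.splitOn s "\n".toList = List.splitOnP (· == '\n') s := by
  rw [toList_newline]
  show PySem.Chars.splitOn.go ['\n'] (s.length + 1) s [] [] = _
  rw [splitOn_go_eq '\n' (s.length + 1) s [] [] (by omega)]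
  cases hs : List.splitOnP (· == '\n') s with
  | nil => exact absurd hs (List.splitOnP_ne_nil _ _)
  | cons q qs => simp

lemma join_splitOnP (s : List Char) :
    PySem.Chars.join "\n".toList (List.splitOnP (· == '\n') s) = s := by
  have h := List.intercalate_splitOn s '\n'
  rw [toList_newline]
  simpa [PySem.Chars.join, List.splitOn] using h

lemma singleton_prefix_head? (a : Char) (l : List Char) : [a] <+: l ↔ l.head? = some a := by
  cases l with
  | nil => simp
  | cons x xs => simp [List.cons_prefix_cons, eq_comm]

lemma splitOnP_break (a b : List Char) (ha : ∀ x ∈ a, (x == '\n') = false) :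
    List.splitOnP (· == '\n') (a ++ '\n' :: b) = a :: List.splitOnP (· == '\n') b := by
  induction a with
  | nil => simp [List.splitOnP_cons]
  | cons y ys ih =>
    have hy := ha y (by simp)
    simp only [List.cons_append, List.splitOnP_cons, hy, Bool.false_eq_true, if_false]
    rw [ih (fun x hx => ha x (by simp [hx]))]
    simp

-- decomposition of s at the first '\n' found
lemma find_decomp (s : List Char) (h : ¬ PySem.Chars.find s "\n".toList = -1) :
    s = s.take (PySem.Chars.find s "\n".toList).toNat
        ++ '\n' :: s.drop ((PySem.Chars.find s "\n".toList).toNat + 1)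
      ∧ ∀ x ∈ s.take (PySem.Chars.find s "\n".toList).toNat, (x == '\n') = false := by
  have h0 : 0 ≤ PySem.Chars.find s "\n".toList := by
    have := PySem.Chars.neg_one_le_find s "\n".toList; omega
  obtain ⟨hpre, hmin⟩ := PySem.Chars.find_spec (s := s) (sub := "\n".toList) h0
  rw [toList_newline] at hpre hmin
  have hhead : (s.drop (PySem.Chars.find s "\n".toList).toNat).head? = some '\n' :=
    (singleton_prefix_head? _ _).mp hpre
  constructor
  · conv_lhs => rw [← List.take_append_drop (PySem.Chars.find s "\n".toList).toNat s]
    congr 1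
    cases hd : s.drop (PySem.Chars.find s "\n".toList).toNat with
    | nil => rw [hd] at hhead; simp at hhead
    | cons y ys =>
      rw [hd] at hhead
      simp only [List.head?_cons, Option.some.injEq] at hhead
      subst hhead
      congr 1
      have := congrArg List.tail hd
      exact (by simpa [List.tail_drop] using this : _ = ys).symm
  · intro x hx
    obtain ⟨j, hj, hget⟩ := List.getElem_of_mem hx
    have hjs : j < s.length := by simp only [List.length_take] at hj; omega
    have hjlt : j < (PySem.Chars.find s "\n".toList).toNat := by
      have hlen := hj
      simp only [List.length_take] at hlen
      omega
    have hgs : s[j] = x := by simpa using hget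
    have hnot := hmin j hjlt
    rw [singleton_prefix_head?, List.head?_drop] at hnot
    by_contra hbe
    simp only [Bool.not_eq_false, beq_iff_eq] at hbe
    exact hnot (by rw [List.getElem?_eq_getElem hjs, hgs, hbe])

lemma refTransform_ne_nil {l : List (List Char)} (h : l ≠ []) : refTransform l ≠ [] := by
  cases l with
  | nil => exact absurd rfl h
  | cons x xs => simp only [refTransform]; split <;> simp

lemma bLoop_eq_acc :
    ∀ (n : Nat) (rem : List Char), rem.length ≤ n → ∀ (acc : List (List Char)),
      bLoop rem acc = acc ++ bLoop rem [] := by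
  intro n
  induction n with
  | zero =>
    intro rem hle acc
    have : rem = [] := List.eq_nil_of_length_eq_zero (by omega)
    subst this
    rw [bLoop, bLoop]
    split_ifs with hnl hm1 hs1 hm2 hs2
    · simp
    · simp
    · simp
    · simp
    · exact absurd (by decide : PySem.Chars.find ([] : List Char) "\n".toList = -1) hnl
    · exact absurd (by decide : PySem.Chars.find ([] : List Char) "\n".toList = -1) hnl
  | succ n ih =>
    intro rem hle acc
    rw [bLoop, bLoop]
    split_ifs with hnl hm1 hs1 hm2 hs2
    · simp
    · simp
    · simp
    · simp
    · have hlt := pvFindNlLt rem hnl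
      rw [ih _ (by omega) (acc ++ _), ih _ (by omega) ([] ++ _)]
      simp
    · have hlt := pvFindNlLt rem hnl
      rw [ih _ (by omega) (acc ++ _), ih _ (by omega) ([] ++ _)]
      simp

lemma bLoop_nil_ne_nil (rem : List Char) : bLoop rem [] ≠ [] := by
  rw [bLoop]
  split_ifs with hnl hm1 hs1 hm2 hs2
  · simp
  · simp
  · simp
  · simp
  · rw [bLoop_eq_acc ((PySem.List.slice rem (some (PySem.Chars.find rem "\n".toList + 1)) none).length)
        _ le_rfl]
    simp
  · rw [bLoop_eq_acc ((PySem.List.slice rem (some (PySem.Chars.find rem "\n".toList + 1)) none).length)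
        _ le_rfl]
    simp

lemma bLoop_join :
    ∀ (n : Nat) (rem : List Char), rem.length ≤ n →
      PySem.Chars.join "\n".toList (bLoop rem [])
        = PySem.Chars.join "\n".toList (refTransform (List.splitOnP (· == '\n') rem)) := by
  intro n
  induction n with
  | zero =>
    intro rem hle
    have hrem : rem = [] := List.eq_nil_of_length_eq_zero (by omega)
    subst hrem
    have hnl : PySem.Chars.find ([] : List Char) ['\n'] = -1 := by decide
    have hst : PySem.Chars.strip ([] : List Char) = [] := by decide
    rw [bLoop]
    simp [hnl, hst, List.splitOnP_nil, refTransform, padLine]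
  | succ n ih =>
    intro rem hle
    rw [bLoop]
    simp only [List.nil_append]
    by_cases hnl : PySem.Chars.find rem "\n".toList = -1
    · -- no newline in the remainder: it is a single line
      have hno : ∀ x ∈ rem, (x == '\n') = false := by
        intro x hx
        have hinf := (PySem.Chars.find_eq_neg_one_iff rem "\n".toList).mp hnl
        rw [toList_newline, List.singleton_infix_iff] at hinf
        by_contra hb
        simp only [Bool.not_eq_false, beq_iff_eq] at hb
        exact hinf (hb ▸ hx)
      rw [List.splitOnP_eq_single _ _ (by simpa using hno)]
      simp only [hnl, if_true, dite_true, refTransform]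
      split_ifs with h <;> simp [padLine] <;> simp_all
    · have h0 : 0 ≤ PySem.Chars.find rem "\n".toList := by
        have := PySem.Chars.neg_one_le_find rem "\n".toList; omega
      obtain ⟨hdec, hnonl⟩ := find_decomp rem hnl
      have hline : PySem.List.slice rem none (some (PySem.Chars.find rem "\n".toList))
          = rem.take (PySem.Chars.find rem "\n".toList).toNat := PySem.List.slice_to rem h0
      have hslice : PySem.List.slice rem (some (PySem.Chars.find rem "\n".toList + 1)) none
          = rem.drop ((PySem.Chars.find rem "\n".toList).toNat + 1) := by
        rw [PySem.List.slice_from rem (by omega)]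
        congr 1
        omega
      have hsplit : List.splitOnP (· == '\n') rem
          = rem.take (PySem.Chars.find rem "\n".toList).toNat
            :: List.splitOnP (· == '\n') (rem.drop ((PySem.Chars.find rem "\n".toList).toNat + 1)) := by
        conv_lhs => rw [hdec]
        exact splitOnP_break _ _ hnonl
      rw [hsplit]
      simp only [hnl, if_false, dite_false, hline, refTransform]
      by_cases hm : ((PySem.Chars.strip (rem.take (PySem.Chars.find rem "\n".toList).toNat))
          == "## Content".toList) = true
      · -- marker line: B emits the raw remainder verbatim
        simp only [hm, if_true]
        rw [PySem.Chars.join_singleton]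
        cases hs : List.splitOnP (· == '\n') (rem.drop ((PySem.Chars.find rem "\n".toList).toNat + 1)) with
        | nil => exact absurd hs (List.splitOnP_ne_nil _ _)
        | cons q qs =>
          rw [PySem.Chars.join_cons_cons, ← hs, join_splitOnP]
          conv_lhs => rw [hdec]
          simp
      · simp only [hm, Bool.false_eq_true, if_false]
        rw [bLoop_eq_acc rem.length _ (by have := pvFindNlLt rem hnl; omega) _]
        have hlt := pvFindNlLt rem hnl
        rw [hslice] at hlt ⊢
        have ihx := ih (rem.drop ((PySem.Chars.find rem "\n".toList).toNat + 1)) (by omega)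
        have htail1 := bLoop_nil_ne_nil (rem.drop ((PySem.Chars.find rem "\n".toList).toNat + 1))
        have htail2 : refTransform (List.splitOnP (· == '\n')
            (rem.drop ((PySem.Chars.find rem "\n".toList).toNat + 1))) ≠ [] :=
          refTransform_ne_nil (List.splitOnP_ne_nil _ _)
        cases h1 : bLoop (rem.drop ((PySem.Chars.find rem "\n".toList).toNat + 1)) [] with
        | nil => exact absurd h1 htail1
        | cons q qs =>
          cases h2 : refTransform (List.splitOnP (· == '\n')
              (rem.drop ((PySem.Chars.find rem "\n".toList).toNat + 1))) with
          | nil => exact absurd h2 htail2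
          | cons r rs =>
            rw [List.singleton_append,
              PySem.Chars.join_cons_cons, PySem.Chars.join_cons_cons, ← h1, ← h2, ihx]
            simp [padLine]

-- ===== VERDICT (by name: the statement is the Claim_ definition above) =====
theorem add_line_spaces_until_content_spec : Claim_equal_add_line_spaces_until_content := by
  intro text _
  unfold Spec_add_line_spaces_until_content
  simp only [add_line_spaces_until_content, add_line_spaces_until_content_alt]
  rw [aLoop_eq _ _ [] (by simp), List.nil_append, splitOn_eq_splitOnP,
    ← bLoop_join (text.toList.length) text.toList le_rfl]
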